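-- pv_equiv track=rewrite | github.com/blackburi/python_algorithm_TIL | programmers/previous_examination/kakao/2023_kakao_blind_recruitment_150367.py | check
-- ===== SOURCE A (Python) =====
-- def check(b, left, right) :
--     # 리프 노드까지 도달 -> 포화 이진트리로 표현 가능
--     if left == right :
--         return True
--
--     # left, right가 있는 트리의 root node index 계산
--     mid = (left + right) // 2
--     root = b[mid]
--
--     # 왼쪽 자식 index
--     left_child = b[(left + (mid-1))//2]
--     # 오른쪽 자식 index
--     right_child = b[(right + (mid+1))//2]
--
--     # 부모가 0인데 자식이 1인경우 False 반환(왼)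
--     if left_child == '1' and root == '0' :
--         return False
--
--     # 부모가 0인데 자식이 1인경우 False 반환(오)
--     if right_child == '1' and root == '0' :
--         return False
--
--     # 왼쪽 자식 트리, 오른쪽 자식 트리 확인
--     return check(b, left, mid-1) and check(b, mid+1, right)
-- ===== SOURCE B (Python) =====
-- def check(b, left, right):
--     stack = [(left, right)]
--     while stack:
--         l, r = stack.pop()
--         if l == r:
--             continue
--         mid = (l + r) // 2
--         root = b[mid]
--         if b[(l + (mid - 1)) // 2] == '1' and root == '0':
--             return False
--         if b[(r + (mid + 1)) // 2] == '1' and root == '0':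
--             return False
--         stack.append((mid + 1, r))
--         stack.append((l, mid - 1))
--     return True
-- ===== Notes on version B (the rewrite author's own statement) =====
-- stated objective: alternative
-- what changed: Replaces A's recursion (with recursive calls combined by short-circuit 'and') by an iterative while-loop over an explicit stack of (left, right) ranges.
-- outside the precondition, e.g. on check('01000', 0, 4): A returns False, B returns False; on check('00', 0, 1): A raises RecursionError, B does not finish within the time limit
import Mathlib
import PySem

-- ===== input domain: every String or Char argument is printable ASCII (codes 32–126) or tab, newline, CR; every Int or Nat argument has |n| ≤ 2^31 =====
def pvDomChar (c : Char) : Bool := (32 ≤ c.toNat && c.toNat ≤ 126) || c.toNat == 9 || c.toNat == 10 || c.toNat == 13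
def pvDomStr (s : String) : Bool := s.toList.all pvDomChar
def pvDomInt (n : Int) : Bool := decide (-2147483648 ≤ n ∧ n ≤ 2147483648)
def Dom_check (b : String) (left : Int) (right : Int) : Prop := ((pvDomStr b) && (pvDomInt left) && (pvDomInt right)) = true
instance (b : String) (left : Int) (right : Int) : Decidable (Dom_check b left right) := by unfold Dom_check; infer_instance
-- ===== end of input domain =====

-- B replaces A's recursion by an explicit worklist of (left, right) ranges (different decomposition,
-- same cost); equivalence is claimed on the return value only.

-- ===== PORT A =====
-- A's recursion, fueled: each recursive step strictly decreases right-left on the admitted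
-- full-tree ranges, so fuel (right-left).toNat+1 is never exhausted inside Pre_check.
def checkF (b : String) (left : Int) (right : Int) : Nat → Bool
  | 0 => true
  | fuel + 1 =>
    if left = right then true
    else
      let mid := PySem.Int.floordiv (left + right) 2
      let root := PySem.List.pyGet? b.toList mid
      let left_child := PySem.List.pyGet? b.toList (PySem.Int.floordiv (left + (mid - 1)) 2)
      let right_child := PySem.List.pyGet? b.toList (PySem.Int.floordiv (right + (mid + 1)) 2)
      if left_child = some '1' ∧ root = some '0' then false
      else if right_child = some '1' ∧ root = some '0' then false
      else checkF b left (mid - 1) fuel && checkF b (mid + 1) right fuel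

def check (b : String) (left : Int) (right : Int) : Bool :=
  checkF b left right ((right - left).toNat + 1)

-- ===== PORT B =====
-- B's while-loop over the worklist, fueled; the list head is the top of B's stack
-- (Python pushes (mid+1, r) then (l, mid-1), so (l, mid-1) is popped first).
def loopB (b : String) : List (Int × Int) → Nat → Bool
  | [], _ => true
  | _ :: _, 0 => true
  | (l, r) :: rest, fuel + 1 =>
    if l = r then loopB b rest fuel
    else
      let mid := PySem.Int.floordiv (l + r) 2
      let root := PySem.List.pyGet? b.toList mid
      if PySem.List.pyGet? b.toList (PySem.Int.floordiv (l + (mid - 1)) 2) = some '1' ∧ root = some '0' then false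
      else if PySem.List.pyGet? b.toList (PySem.Int.floordiv (r + (mid + 1)) 2) = some '1' ∧ root = some '0' then false
      else loopB b ((l, mid - 1) :: (mid + 1, r) :: rest) fuel

def check_alt (b : String) (left : Int) (right : Int) : Bool :=
  loopB b [(left, right)] (2 * (right - left).toNat + 2)

-- ===== PRECONDITION & SPEC =====
-- Pre_check excludes the inputs on which A's termination is accidental: unless left = right
-- (where A returns True without touching b) A indexes b within [left, right] and recurses on both
-- halves, so it raises IndexError on out-of-range bounds and, when the range size right-left+1 is
-- not of the form 2^k - 1 (not a full binary tree), it reaches an empty range and recurses forever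
-- (RecursionError) unless an early '1'-under-'0' violation happens to short-circuit it first; those
-- accidental early-False returns are excluded together with the crashes.
def Pre_check (b : String) (left : Int) (right : Int) : Prop :=
  left = right ∨
    (0 ≤ left ∧ left ≤ right ∧ right < (b.toList.length : Int) ∧
      ∃ k : Nat, k < 34 ∧ right - left + 2 = 2 ^ k)
instance (b : String) (left : Int) (right : Int) : Decidable (Pre_check b left right) := by
  unfold Pre_check; infer_instance
def pvWitness_check : String × Int × Int := ("0111001", 0, 6)
def Spec_check (b : String) (left : Int) (right : Int) (out : Bool) : Prop := out = check_alt b left right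
instance (b : String) (left : Int) (right : Int) (out : Bool) : Decidable (Spec_check b left right out) := by unfold Spec_check; infer_instance

-- ===== CLAIM (what is proved, stated in full; the proofs are below) =====
def Claim_equal_check : Prop := ∀ (b : String) (left : Int) (right : Int), Dom_check b left right → Pre_check b left right → Spec_check b left right (check b left right)

-- ===== LEMMAS AND PROOFS =====

-- the common recursive value both fueled programs compute on full-tree ranges
def ok (b : String) (l r : Int) : Bool :=
  if r ≤ l then true
  else
    let mid := PySem.Int.floordiv (l + r) 2
    let root := PySem.List.pyGet? b.toList mid
    if PySem.List.pyGet? b.toList (PySem.Int.floordiv (l + (mid - 1)) 2) = some '1' ∧ root = some '0' then false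
    else if PySem.List.pyGet? b.toList (PySem.Int.floordiv (r + (mid + 1)) 2) = some '1' ∧ root = some '0' then false
    else ok b l (mid - 1) && ok b (mid + 1) r
termination_by (r - l).toNat
decreasing_by
  · have h := PySem.Int.floordiv_two_mid_bounds (lo := l) (hi := r) (by omega)
    omega
  · have h := PySem.Int.floordiv_two_mid_bounds (lo := l) (hi := r) (by omega)
    omega

def Good (l r : Int) : Prop := l ≤ r ∧ ∃ k : Nat, r - l + 2 = 2 ^ k

-- splitting a full-tree range: the midpoint is exact and both halves are full-tree ranges
theorem good_split {l r : Int} (hlt : l < r) (hg : Good l r) :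
    PySem.Int.floordiv (l + r) 2 = l + (r - l + 2) / 2 - 1 ∧
    Good l (PySem.Int.floordiv (l + r) 2 - 1) ∧
    Good (PySem.Int.floordiv (l + r) 2 + 1) r ∧
    (PySem.Int.floordiv (l + r) 2 - 1 - l).toNat < (r - l).toNat ∧
    (r - (PySem.Int.floordiv (l + r) 2 + 1)).toNat < (r - l).toNat ∧
    ((PySem.Int.floordiv (l + r) 2 - 1 - l).toNat + 1) + ((r - (PySem.Int.floordiv (l + r) 2 + 1)).toNat + 1)
      = (r - l).toNat := by
  obtain ⟨-, k, hk⟩ := hg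
  have hk2 : 2 ≤ k := by
    by_contra h
    interval_cases k <;> omega
  have hpow : (2 : Int) ^ k = 2 ^ (k - 1) * 2 := by
    conv_lhs => rw [show k = (k - 1) + 1 by omega]
    rw [pow_succ]
  have hpow1 : (2 : Int) ^ (k - 1) = 2 ^ (k - 2) * 2 := by
    conv_lhs => rw [show k - 1 = (k - 2) + 1 by omega]
    rw [pow_succ]
  have hp2 : (0 : Int) < 2 ^ (k - 2) := by positivity
  have hmid : PySem.Int.floordiv (l + r) 2 = l + 2 ^ (k - 1) - 1 := by
    have : l + r = 2 * (l + 2 ^ (k - 1) - 1) := by omega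
    rw [this, PySem.Int.floordiv_eq_ediv_of_pos (by omega)]
    omega
  refine ⟨?_, ⟨by omega, k - 1, by omega⟩, ⟨by omega, k - 1, by omega⟩, by omega, by omega, by omega⟩
  rw [hmid]
  omega

-- A's fueled recursion computes ok on full-tree ranges
theorem checkF_eq_ok (b : String) :
    ∀ (fuel : Nat) (l r : Int), Good l r → (r - l).toNat < fuel → checkF b l r fuel = ok b l r := by
  intro fuel
  induction fuel with
  | zero => intro l r _ h; omega
  | succ fuel ih =>
    intro l r hg hf
    by_cases heq : l = r
    · subst heq
      rw [checkF, ok]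
      simp
    · have hlt : l < r := by rcases hg with ⟨h1, -⟩; omega
      obtain ⟨-, hg1, hg2, hm1, hm2, -⟩ := good_split hlt hg
      rw [checkF, ok]
      simp only [heq, if_false, if_neg (by omega : ¬ r ≤ l)]
      split_ifs with h1 h2
      · rfl
      · rfl
      · rw [ih _ _ hg1 (by omega), ih _ _ hg2 (by omega)]

def stackMeasure (st : List (Int × Int)) : Nat :=
  (st.map (fun p => (p.2 - p.1).toNat + 1)).sum

-- B's fueled worklist loop computes the conjunction of ok over the stack, for stacks of full-tree ranges
theorem loopB_eq_ok (b : String) :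
    ∀ (fuel : Nat) (st : List (Int × Int)), (∀ p ∈ st, Good p.1 p.2) → stackMeasure st < fuel →
      loopB b st fuel = st.all (fun p => ok b p.1 p.2) := by
  intro fuel
  induction fuel with
  | zero =>
    intro st hg hf
    cases st with
    | nil => rfl
    | cons p rest => exact absurd hf (by simp [stackMeasure])
  | succ fuel ih =>
    intro st hg hf
    cases st with
    | nil => rfl
    | cons p rest =>
      obtain ⟨l, r⟩ := p
      have hglr : Good l r := hg (l, r) (by simp)
      have hgrest : ∀ q ∈ rest, Good q.1 q.2 := fun q hq => hg q (by simp [hq])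
      by_cases heq : l = r
      · subst heq
        have hok : ok b l l = true := by rw [ok]; simp
        rw [loopB]
        simp only [reduceIte]
        rw [ih rest hgrest (by simp [stackMeasure] at hf ⊢; omega), List.all_cons, hok]
        simp
      · have hlt : l < r := by rcases hglr with ⟨h1, -⟩; omega
        obtain ⟨-, hg1, hg2, -, -, hsum⟩ := good_split hlt hglr
        rw [loopB, List.all_cons, ok]
        simp only [heq, if_false, if_neg (by omega : ¬ r ≤ l)]
        split_ifs with h1 h2
        · simp
        · simp
        · rw [ih _ (by
              intro q hq
              simp only [List.mem_cons] at hq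
              rcases hq with rfl | rfl | hq
              · exact hg1
              · exact hg2
              · exact hgrest q hq)
            (by simp only [stackMeasure, List.map_cons, List.sum_cons] at hf ⊢; omega)]
          simp [Bool.and_assoc]

-- ===== VERDICT (by name: the statement is the Claim_ definition above) =====
theorem check_spec : Claim_equal_check := by
  intro b left right _ hpre
  unfold Spec_check check check_alt
  rcases hpre with heq | ⟨h0, hle, hlen, k, hk, hpow⟩
  · subst heq
    rw [checkF, loopB]
    simp [loopB]
  · have hgood : Good left right := ⟨hle, k, hpow⟩
    rw [checkF_eq_ok b _ _ _ hgood (by omega),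
        loopB_eq_ok b _ _ (by intro p hp; simp at hp; rw [hp]; exact hgood) (by simp [stackMeasure]; omega)]
    simp
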